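-- pv_equiv track=rewrite | github.com/sun10081/leetcode_practice_xiaorui | questions/week/2023/2023_11/11_25/3.py | minimumCoins2
-- ===== SOURCE A (Python) =====
-- from typing import List
-- from math import inf
-- from functools import cache
--
-- def minimumCoins2(prices: List[int]) -> int:
--     @cache
--     def dfs(i):
--         if i * 2 >= n:
--             return prices[i - 1]
--         ans = inf
--         for j in range(i + 1, 2 * i + 2):
--             ans = min(ans, dfs(j))
--         return ans + prices[i - 1]
--     n = len(prices)
--     return dfs(1)
-- ===== SOURCE B (Python) =====
-- from typing import List
-- from collections import deque
--
-- def minimumCoins2(prices: List[int]) -> int: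
--     # Bottom-up DP: dp[i] = min coins to buy fruits i..n after paying for fruit i.
--     # dp[i] = prices[i-1] + min(dp[i+1..2i+1]) when 2i < n, else prices[i-1].
--     # The window minimum is maintained with a monotonic deque (indices increasing,
--     # dp values strictly decreasing front-to-back), giving O(n) total.
--     n = len(prices)
--     dp = [0] * (n + 1)
--     dq = deque()
--     for i in range(n, 0, -1):
--         if 2 * i >= n:
--             dp[i] = prices[i - 1]
--         else:
--             while dq[-1] > 2 * i + 1:
--                 dq.pop()
--             dp[i] = prices[i - 1] + dp[dq[-1]]
--         while dq and dp[dq[0]] >= dp[i]: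
--             dq.popleft()
--         dq.appendleft(i)
--     return dp[1]
-- ===== Notes on version B (the rewrite author's own statement) =====
-- stated objective: faster
-- what changed: Replaced the memoized top-down recursion (each state scans its whole window [i+1,2i+2)) by a bottom-up DP from i=n down to 1 whose window minimum is maintained with a monotonic deque, so every index is pushed and popped at most once.
import Mathlib
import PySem

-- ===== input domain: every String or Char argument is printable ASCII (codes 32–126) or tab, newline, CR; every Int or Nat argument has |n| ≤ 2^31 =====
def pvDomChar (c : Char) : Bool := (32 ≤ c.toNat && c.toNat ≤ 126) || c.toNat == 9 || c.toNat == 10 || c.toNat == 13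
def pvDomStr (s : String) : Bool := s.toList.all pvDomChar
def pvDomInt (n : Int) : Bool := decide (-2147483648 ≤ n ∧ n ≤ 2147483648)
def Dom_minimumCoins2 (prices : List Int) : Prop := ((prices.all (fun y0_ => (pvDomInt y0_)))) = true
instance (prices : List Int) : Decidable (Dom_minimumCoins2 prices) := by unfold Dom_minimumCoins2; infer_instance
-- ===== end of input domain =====

-- B replaces A's memoized recursion (quadratic total window scanning) by a bottom-up
-- DP with a monotonic-deque sliding-window minimum; a timing run measured B faster.

-- ===== PORT A =====
-- dfs of A; memoization (@cache) does not change the computed value, so the port is the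
-- plain recursion.  'ans = inf' is modelled by Option Int (none = inf), and prices[i-1]
-- by pyGet? with default 0: the IndexError case (prices = []) is excluded by Pre_.
def dfsA (prices : List Int) (n : Nat) (i : Nat) : Int :=
  if _h : n ≤ 2 * i then
    (PySem.List.pyGet? prices ((i : Int) - 1)).getD 0
  else
    let ans : Option Int :=
      (PySem.List.pyRange ((i : Int) + 1) (2 * (i : Int) + 2) 1).attach.foldl
        (fun acc j =>
          some (match acc with
                | none => dfsA prices n j.1.toNat
                | some a => min a (dfsA prices n j.1.toNat))) none
    ans.getD 0 + (PySem.List.pyGet? prices ((i : Int) - 1)).getD 0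
termination_by n - i
decreasing_by
  have hm := PySem.List.mem_pyRange_one.mp j.2
  omega

def minimumCoins2 (prices : List Int) : Int :=
  dfsA prices prices.length 1

-- ===== PORT B =====
-- 'while dq[-1] > b: dq.pop()' — pop from the back while the last index exceeds b.
def pvExpire (dq : List Nat) (b : Nat) : List Nat :=
  ((dq.reverse.dropWhile (fun k => decide (b < k))).reverse)

-- the 'for i in range(n, 0, -1)' loop of Source B; state = (dp, dq); all dp reads are
-- in range in every admitted run, so '.getD 0' never supplies its default there.
def loopB (prices : List Int) (n : Nat) : Nat → Array Int → List Nat → Array Int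
  | 0, dp, _ => dp
  | i+1, dp, dq =>
    let ii := i + 1
    let p := (PySem.List.pyGet? prices ((ii : Int) - 1)).getD 0
    if n ≤ 2 * ii then
      let dp1 := dp.set! ii p
      let dq2 := ii :: dq.dropWhile (fun k => decide ((dp1[ii]?).getD 0 ≤ (dp1[k]?).getD 0))
      loopB prices n i dp1 dq2
    else
      let dq' := pvExpire dq (2 * ii + 1)
      let dp1 := dp.set! ii (p + (dp[(dq'.getLast?.getD 0)]?).getD 0)
      let dq2 := ii :: dq'.dropWhile (fun k => decide ((dp1[ii]?).getD 0 ≤ (dp1[k]?).getD 0))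
      loopB prices n i dp1 dq2

def minimumCoins2_alt (prices : List Int) : Int :=
  let n := prices.length
  ((loopB prices n n (Array.replicate (n+1) 0) [])[1]?).getD 0

-- ===== PRECONDITION & SPEC =====
-- Pre_ excludes only the empty list, on which A (prices[0]) and B (dp[1]) both raise IndexError.
def Pre_minimumCoins2 (prices : List Int) : Prop := prices ≠ []
instance (prices : List Int) : Decidable (Pre_minimumCoins2 prices) := by unfold Pre_minimumCoins2; infer_instance
def pvWitness_minimumCoins2 : List Int := [3, 1, 2]

def Spec_minimumCoins2 (prices : List Int) (out : Int) : Prop := out = minimumCoins2_alt prices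
instance (prices : List Int) (out : Int) : Decidable (Spec_minimumCoins2 prices out) := by unfold Spec_minimumCoins2; infer_instance

-- ===== CLAIM (what is proved, stated in full; the proofs are below) =====
def Claim_equal_minimumCoins2 : Prop := ∀ (prices : List Int), Dom_minimumCoins2 prices → Pre_minimumCoins2 prices → Spec_minimumCoins2 prices (minimumCoins2 prices)

-- ===== LEMMAS AND PROOFS =====

-- min of f over 0..m
def rmin (f : Nat → Int) : Nat → Int
  | 0 => f 0
  | m+1 => min (rmin f m) (f (m+1))

theorem rmin_le (f : Nat → Int) (m k : Nat) (h : k ≤ m) : rmin f m ≤ f k := by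
  induction m with
  | zero => interval_cases k <;> simp [rmin]
  | succ m ih =>
    rcases Nat.lt_or_ge k (m+1) with hk | hk
    · exact le_trans (by simp [rmin]) (ih (by omega))
    · have : k = m + 1 := by omega
      subst this; simp [rmin]

theorem rmin_exists (f : Nat → Int) (m : Nat) : ∃ k, k ≤ m ∧ rmin f m = f k := by
  induction m with
  | zero => exact ⟨0, le_refl _, rfl⟩
  | succ m ih =>
    rcases ih with ⟨k, hk, he⟩
    rcases le_total (rmin f m) (f (m+1)) with h | h
    · exact ⟨k, by omega, by simp only [rmin]; rw [min_eq_left h, he]⟩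
    · exact ⟨m+1, le_refl _, by simp only [rmin]; rw [min_eq_right h]⟩

theorem rmin_congr (f g : Nat → Int) (m : Nat) (h : ∀ k, k ≤ m → f k = g k) :
    rmin f m = rmin g m := by
  induction m with
  | zero => simpa [rmin] using h 0 (le_refl _)
  | succ m ih =>
    simp only [rmin]
    rw [ih (fun k hk => h k (by omega)), h (m+1) (le_refl _)]

theorem foldl_optmin (f : Nat → Int) (m : Nat) :
    (List.range (m+1)).foldl
      (fun acc k => some (match acc with | none => f k | some a => min a (f k)))
      (none : Option Int) = some (rmin f m) := by
  induction m with
  | zero => simp [List.range_succ, rmin]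
  | succ m ih =>
    rw [List.range_succ, List.foldl_append, ih]
    simp [rmin]

theorem dfsA_base (prices : List Int) (n i : Nat) (h : n ≤ 2 * i) :
    dfsA prices n i = (PySem.List.pyGet? prices ((i : Int) - 1)).getD 0 := by
  unfold dfsA
  rw [dif_pos h]

theorem dfsA_rec (prices : List Int) (n i : Nat) (h : 2 * i < n) :
    dfsA prices n i
      = rmin (fun k => dfsA prices n (i + 1 + k)) i
        + (PySem.List.pyGet? prices ((i : Int) - 1)).getD 0 := by
  conv_lhs => unfold dfsA
  rw [dif_neg (by omega)]
  have h1 : ((PySem.List.pyRange ((i : Int) + 1) (2 * (i : Int) + 2) 1).attach.foldl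
        (fun acc j =>
          some (match acc with
                | none => dfsA prices n j.1.toNat
                | some a => min a (dfsA prices n j.1.toNat))) (none : Option Int))
      = ((PySem.List.pyRange ((i : Int) + 1) (2 * (i : Int) + 2) 1).foldl
        (fun acc j =>
          some (match acc with
                | none => dfsA prices n j.toNat
                | some a => min a (dfsA prices n j.toNat))) (none : Option Int)) :=
    List.foldl_attach
      (f := fun (acc : Option Int) (j : Int) =>
        some (match acc with
              | none => dfsA prices n j.toNat
              | some a => min a (dfsA prices n j.toNat)))
  rw [h1, PySem.List.pyRange_one]
  have h2 : (2 * (i:Int) + 2 - ((i:Int) + 1)).toNat = i + 1 := by omega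
  rw [h2, List.foldl_map]
  have h3 := foldl_optmin (fun k : Nat => dfsA prices n (((i:Int) + 1 + (k:Int)).toNat)) i
  rw [h3]
  have h4 : rmin (fun k : Nat => dfsA prices n (((i:Int) + 1 + (k:Int)).toNat)) i
      = rmin (fun k => dfsA prices n (i + 1 + k)) i := by
    refine rmin_congr _ _ _ (fun k hk => ?_)
    have he : ((i:Int) + 1 + (k:Int)).toNat = i + 1 + k := by omega
    rw [he]
  simp [h4]

-- dropWhile facts
theorem dropWhile_eq_cons_head_false {α : Type} (p : α → Bool) (l : List α) (x : α) (t : List α)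
    (h : l.dropWhile p = x :: t) : p x = false := by
  induction l with
  | nil => simp at h
  | cons a l ih =>
    rw [List.dropWhile_cons] at h
    by_cases hp : p a
    · simp [hp] at h; exact ih h
    · simp [hp] at h; rw [h.1] at hp; simpa using hp

theorem mem_of_not_mem_dropWhile {α : Type} (p : α → Bool) (l : List α) (x : α)
    (hx : x ∈ l) (hnx : x ∉ l.dropWhile p) : p x = true := by
  have h := List.takeWhile_append_dropWhile (p := p) (l := l)
  rw [← h] at hx
  rcases List.mem_append.mp hx with h1 | h1
  · exact List.mem_takeWhile_imp h1
  · exact absurd h1 hnx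

-- pvExpire facts
theorem pvExpire_cons (x : Nat) (t : List Nat) (b : Nat) :
    pvExpire (x :: t) b
      = if pvExpire t b = [] then (if b < x then [] else [x]) else x :: pvExpire t b := by
  unfold pvExpire
  rw [List.reverse_cons, List.dropWhile_append]
  by_cases he : t.reverse.dropWhile (fun k => decide (b < k)) = []
  · simp [he]
    by_cases hbx : b < x <;> simp [hbx]
  · simp [he]

theorem pvExpire_sublist (l : List Nat) (b : Nat) : List.Sublist (pvExpire l b) l := by
  have h := List.dropWhile_sublist (l := l.reverse) (p := fun k => decide (b < k))
  have := h.reverse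
  simpa [pvExpire] using this

theorem mem_pvExpire_le (l : List Nat) (b k : Nat) (hpw : l.Pairwise (· < ·))
    (hk : k ∈ pvExpire l b) : k ≤ b := by
  have hk' : k ∈ l.reverse.dropWhile (fun k => decide (b < k)) := by
    simpa [pvExpire] using hk
  have hpwr : (l.reverse.dropWhile (fun k => decide (b < k))).Pairwise (fun a c => c < a) := by
    exact List.Pairwise.sublist (List.dropWhile_sublist _) ((List.pairwise_reverse).mpr hpw)
  match hd : l.reverse.dropWhile (fun k => decide (b < k)) with
  | [] => rw [hd] at hk'; simp at hk'
  | x :: t =>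
    have hx : ¬ b < x := by
      have := dropWhile_eq_cons_head_false _ _ _ _ hd
      simpa using this
    rw [hd] at hk' hpwr
    rcases List.mem_cons.mp hk' with h1 | h1
    · omega
    · have := (List.pairwise_cons.mp hpwr).1 k h1
      omega

theorem mem_pvExpire_of (l : List Nat) (b k : Nat) (hk : k ∈ l) (hkb : k ≤ b) :
    k ∈ pvExpire l b := by
  simp only [pvExpire, List.mem_reverse]
  by_contra hn
  have := mem_of_not_mem_dropWhile _ _ _ (by simpa using hk) hn
  simp at this
  omega

theorem head?_pvExpire (l : List Nat) (b h0 : Nat) (hh : l.head? = some h0) (hb : h0 ≤ b) :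
    (pvExpire l b).head? = some h0 := by
  match l with
  | [] => simp at hh
  | x :: t =>
    have hx : x = h0 := by simpa using hh
    subst hx
    rw [pvExpire_cons]
    have hbx : ¬ b < x := by omega
    split
    · simp [hbx]
    · simp

theorem pairwise_getLast {α : Type} {R : α → α → Prop} (l : List α) (h : l.Pairwise R)
    (hne : l ≠ []) : ∀ x ∈ l, x = l.getLast hne ∨ R x (l.getLast hne) := by
  induction l with
  | nil => simp at hne
  | cons a t ih =>
    intro x hx
    match t with
    | [] => simp at hx; simp [hx, List.getLast]
    | c :: t' =>
      have hgl : (a :: c :: t').getLast hne = (c :: t').getLast (by simp) :=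
        List.getLast_cons (by simp)
      rw [hgl]
      rcases List.mem_cons.mp hx with h1 | h1
      · subst h1
        right
        exact (List.pairwise_cons.mp h).1 _ (List.getLast_mem _)
      · exact ih (List.pairwise_cons.mp h).2 (by simp) x h1

-- the loop invariant: entering loopB with counter i (indices i+1..n already processed)
def InvB (prices : List Int) (n i : Nat) (dp : Array Int) (dq : List Nat) : Prop :=
  dp.size = n + 1 ∧
  (∀ j : Nat, i < j → j ≤ n → (dp[j]?).getD 0 = dfsA prices n j) ∧
  (if i = n then dq = [] else dq.head? = some (i+1)) ∧
  (∀ k ∈ dq, i + 1 ≤ k ∧ k ≤ min (2*i+3) n) ∧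
  dq.Pairwise (fun a b => a < b ∧ dfsA prices n b < dfsA prices n a) ∧
  (∀ j : Nat, i + 1 ≤ j → j ≤ min (2*i+3) n →
    ∃ k ∈ dq, k ≤ j ∧ dfsA prices n k ≤ dfsA prices n j)

-- the push step: given the processed value dp1[i+1] = f(i+1) and the (possibly expired)
-- deque with the old guarantees, the popleft-then-appendleft step restores InvB at i.
theorem afterPush (prices : List Int) (n i : Nat) (dp1 : Array Int) (dqq : List Nat)
    (hsize : dp1.size = n + 1) (hi1 : i + 1 ≤ n)
    (hdp : ∀ j : Nat, i < j → j ≤ n → (dp1[j]?).getD 0 = dfsA prices n j)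
    (hmem : ∀ k ∈ dqq, i + 2 ≤ k ∧ k ≤ min (2*i+3) n)
    (hpw : dqq.Pairwise (fun a b => a < b ∧ dfsA prices n b < dfsA prices n a))
    (hdom : ∀ j : Nat, i + 2 ≤ j → j ≤ min (2*i+3) n →
      ∃ k ∈ dqq, k ≤ j ∧ dfsA prices n k ≤ dfsA prices n j) :
    InvB prices n i dp1
      ((i+1) :: dqq.dropWhile (fun k => decide ((dp1[i+1]?).getD 0 ≤ (dp1[k]?).getD 0))) := by
  have hfi : (dp1[i+1]?).getD 0 = dfsA prices n (i+1) := hdp (i+1) (by omega) hi1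
  have hread : ∀ k ∈ dqq, (dp1[k]?).getD 0 = dfsA prices n k := fun k hk =>
    hdp k (by have := (hmem k hk).1; omega) (by have := (hmem k hk).2; omega)
  set pred := fun k : Nat => decide ((dp1[i+1]?).getD 0 ≤ (dp1[k]?).getD 0) with hpred
  set kept := dqq.dropWhile pred with hkept
  have hkeptsub : List.Sublist kept dqq := List.dropWhile_sublist _
  have hkeptmem : ∀ k ∈ kept, k ∈ dqq := fun k hk => hkeptsub.subset hk
  have hlt : ∀ k ∈ kept, dfsA prices n k < dfsA prices n (i+1) := by
    intro k hk
    rcases hkl : kept with _ | ⟨k0, t⟩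
    · rw [hkl] at hk; simp at hk
    · have hdw : List.dropWhile pred dqq = k0 :: t := by rw [← hkept, hkl]
      have hp0 : pred k0 = false :=
        dropWhile_eq_cons_head_false pred dqq k0 t hdw
      have hk00 : k0 ∈ dqq := hkeptmem k0 (by rw [hkl]; simp)
      have hf0 : dfsA prices n k0 < dfsA prices n (i+1) := by
        have := hp0
        simp only [hpred, hfi, hread k0 hk00, decide_eq_false_iff_not, not_le] at this
        exact this
      rw [hkl] at hk
      rcases List.mem_cons.mp hk with rfl | hkt
      · exact hf0
      · have hpwk := List.Pairwise.sublist hkeptsub hpw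
        rw [hkl] at hpwk
        exact lt_trans ((List.pairwise_cons.mp hpwk).1 k hkt).2 hf0
  refine ⟨hsize, hdp, ?_, ?_, ?_, ?_⟩
  · have hne : i ≠ n := by omega
    simp [hne]
  · intro k hk
    rcases List.mem_cons.mp hk with rfl | hk
    · omega
    · have := hmem k (hkeptmem _ hk); omega
  · rw [List.pairwise_cons]
    refine ⟨fun k hk => ⟨by have := (hmem k (hkeptmem _ hk)).1; omega, hlt k hk⟩, ?_⟩
    exact List.Pairwise.sublist hkeptsub hpw
  · intro j hj1 hj2
    by_cases hji : j = i + 1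
    · exact ⟨i+1, by simp, by omega, by rw [hji]⟩
    · obtain ⟨k, hkdq, hkj, hkf⟩ := hdom j (by omega) hj2
      by_cases hkk : k ∈ kept
      · exact ⟨k, by simp [hkk], hkj, hkf⟩
      · have hpk := mem_of_not_mem_dropWhile pred dqq k hkdq hkk
        have hle : dfsA prices n (i+1) ≤ dfsA prices n k := by
          simpa [hpred, hfi, hread k hkdq] using hpk
        exact ⟨i+1, by simp, by omega, le_trans hle hkf⟩

theorem loopB_sem (prices : List Int) (n : Nat) :
    ∀ (i : Nat) (dp : Array Int) (dq : List Nat), i ≤ n → InvB prices n i dp dq →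
      ∀ j : Nat, 0 < j → j ≤ n → ((loopB prices n i dp dq)[j]?).getD 0 = dfsA prices n j := by
  intro i
  induction i with
  | zero =>
    intro dp dq _ hInv j hj1 hj2
    simpa [loopB] using hInv.2.1 j hj1 hj2
  | succ i ih =>
    intro dp dq hin hInv j hj1 hj2
    obtain ⟨hsize, hdp, hhead, hmem, hpw, hdom⟩ := hInv
    by_cases hbase : n ≤ 2 * (i + 1)
    · -- base case of the recurrence: dp[i+1] = prices[i]
      simp only [loopB, if_pos hbase]
      set p := (PySem.List.pyGet? prices (((i:Int) + 1) - 1)).getD 0 with hpdef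
      set dp1 := dp.set! (i+1) p with hdp1
      have hsize1 : dp1.size = n + 1 := by
        simp [hdp1, Array.set!, hsize]
      have hdp' : ∀ j : Nat, i < j → j ≤ n → (dp1[j]?).getD 0 = dfsA prices n j := by
        intro j h1 h2
        by_cases hj : j = i + 1
        · subst hj
          have : dp1[i+1]? = some p := by
            simp [hdp1, Array.set!, Array.getElem?_setIfInBounds, hsize]
            omega
          rw [this, Option.getD_some, dfsA_base prices n (i+1) hbase, hpdef]
          norm_num
        · have : dp1[j]? = dp[j]? := by
            simp [hdp1, Array.set!, Array.getElem?_setIfInBounds, Ne.symm hj]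
          rw [this]
          exact hdp j (by omega) h2
      refine ih _ _ (by omega) (afterPush prices n i dp1 dq hsize1 hin hdp' ?_ hpw ?_) j hj1 hj2
      · intro k hk
        have := hmem k hk
        omega
      · intro j h1 h2
        exact hdom j h1 (by omega)
    · -- recursive case: expire the deque to 2i+3, read the window minimum at its back
      push_neg at hbase
      simp only [loopB, if_neg (by omega : ¬ n ≤ 2 * (i + 1))]
      have hi1n : i + 1 < n := by omega
      have hhead' : dq.head? = some (i+2) := by
        have : ¬ (i + 1 = n) := by omega
        simpa [this] using hhead
      set b := 2 * (i + 1) + 1 with hb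
      set dq' := pvExpire dq b with hdq'
      have hhead'' : dq'.head? = some (i+2) := by
        exact head?_pvExpire dq b (i+2) hhead' (by omega)
      have hne' : dq' ≠ [] := by
        intro hcon; rw [hcon] at hhead''; simp at hhead''
      have hpwlt : dq.Pairwise (· < ·) := hpw.imp (fun h => h.1)
      have hsub' : List.Sublist dq' dq := pvExpire_sublist dq b
      have hpw' : dq'.Pairwise (fun a c => a < c ∧ dfsA prices n c < dfsA prices n a) :=
        List.Pairwise.sublist hsub' hpw
      set last := dq'.getLast hne' with hlastdef
      have hlast? : dq'.getLast?.getD 0 = last := by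
        rw [List.getLast?_eq_some_getLast hne']; rfl
      have hlastmem' : last ∈ dq' := List.getLast_mem hne'
      have hlastdq : last ∈ dq := hsub'.subset hlastmem'
      have hlastb : last ≤ b := mem_pvExpire_le dq b last hpwlt hlastmem'
      have hlastlo : i + 2 ≤ last := (hmem last hlastdq).1
      have hbn : b ≤ n := by omega
      have hreadlast : (dp[last]?).getD 0 = dfsA prices n last :=
        hdp last (by omega) (by omega)
      -- the back of the expired deque is the window minimum
      have hwin : dfsA prices n last = rmin (fun k => dfsA prices n (i + 2 + k)) (i + 1) := by
        obtain ⟨k0, hk0, he0⟩ := rmin_exists (fun k => dfsA prices n (i + 2 + k)) (i + 1)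
        have hj0 : i + 2 ≤ i + 2 + k0 ∧ i + 2 + k0 ≤ min (2*(i+1)+3) n := by omega
        obtain ⟨k, hkdq, hkj, hkf⟩ := hdom (i + 2 + k0) (by omega) hj0.2
        have hkdq' : k ∈ dq' := mem_pvExpire_of dq b k hkdq (by omega)
        have hlastk : dfsA prices n last ≤ dfsA prices n k := by
          rcases pairwise_getLast dq' hpw' hne' k hkdq' with h | h
          · rw [h]
          · exact le_of_lt h.2
        have h1 : dfsA prices n last ≤ rmin (fun k => dfsA prices n (i + 2 + k)) (i + 1) := by
          rw [he0]; exact le_trans hlastk hkf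
        have h2 : rmin (fun k => dfsA prices n (i + 2 + k)) (i + 1) ≤ dfsA prices n last := by
          have hl : last = i + 2 + (last - (i + 2)) := by omega
          have := rmin_le (fun k => dfsA prices n (i + 2 + k)) (i + 1) (last - (i + 2)) (by omega)
          simpa [← hl] using this
        exact le_antisymm h1 h2
      set p := (PySem.List.pyGet? prices (((i:Int) + 1) - 1)).getD 0 with hpdef
      set v := p + (dp[(dq'.getLast?.getD 0)]?).getD 0 with hv
      have hvval : v = dfsA prices n (i+1) := by
        rw [hv, hlast?, hreadlast, hwin,
            dfsA_rec prices n (i+1) (by omega)]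
        have harg : ∀ k, (i+1) + 1 + k = i + 2 + k := by omega
        rw [rmin_congr (fun k => dfsA prices n ((i+1) + 1 + k)) (fun k => dfsA prices n (i + 2 + k)) (i+1)
            (fun k _ => by
              show dfsA prices n (i + 1 + 1 + k) = dfsA prices n (i + 2 + k)
              rw [harg k])]
        have : ((i+1 : Nat) : Int) - 1 = ((i:Int) + 1) - 1 := by push_cast; ring
        rw [this, add_comm]
      set dp1 := dp.set! (i+1) v with hdp1
      have hsize1 : dp1.size = n + 1 := by
        simp [hdp1, Array.set!, hsize]
      have hdp' : ∀ j : Nat, i < j → j ≤ n → (dp1[j]?).getD 0 = dfsA prices n j := by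
        intro j h1 h2
        by_cases hj : j = i + 1
        · subst hj
          have : dp1[i+1]? = some v := by
            simp [hdp1, Array.set!, Array.getElem?_setIfInBounds, hsize]
            omega
          rw [this, Option.getD_some, hvval]
        · have : dp1[j]? = dp[j]? := by
            simp [hdp1, Array.set!, Array.getElem?_setIfInBounds, Ne.symm hj]
          rw [this]
          exact hdp j (by omega) h2
      refine ih _ _ (by omega) (afterPush prices n i dp1 dq' hsize1 hin hdp' ?_ hpw' ?_) j hj1 hj2
      · intro k hk
        have h1 := (hmem k (hsub'.subset hk)).1
        have h2 := mem_pvExpire_le dq b k hpwlt hk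
        omega
      · intro j h1 h2
        obtain ⟨k, hkdq, hkj, hkf⟩ := hdom j h1 (by omega)
        exact ⟨k, mem_pvExpire_of dq b k hkdq (by omega), hkj, hkf⟩

-- ===== VERDICT (by name: the statement is the Claim_ definition above) =====
theorem minimumCoins2_spec : Claim_equal_minimumCoins2 := by
  unfold Claim_equal_minimumCoins2
  intro prices _hdom hpre
  unfold Spec_minimumCoins2 minimumCoins2 minimumCoins2_alt
  set n := prices.length with hn
  have hn1 : 1 ≤ n := by
    match prices, hn with
    | [], _ => exact absurd rfl hpre
    | (x :: t), hn => simp [hn]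
  have hInit : InvB prices n n (Array.replicate (n+1) 0) [] := by
    refine ⟨by simp, ?_, by simp, by simp, by simp, ?_⟩
    · intro j h1 h2; exact absurd h2 (by omega)
    · intro j h1 h2; exact absurd h2 (by omega)
  have hfin := loopB_sem prices n n (Array.replicate (n+1) 0) [] (le_refl n) hInit 1 (by omega) hn1
  rw [hfin]
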